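-- pv_equiv track=rewrite | github.com/Fondamenti18/fondamenti-di-programmazione | students/1812793/homework02/program03.py | crea_cod
-- ===== SOURCE A (Python) =====
-- def crea_cod(cod):
--     a=0
--     s=""
--     d=dict()
--     for i in range(0,len(cod)):
--         if cod[i] not in d:
--             d[cod[i]]=i-a
--         else:
--             a+=1
--     for i in list(cod):
--         s+=str(d[i])
--     return s
-- ===== SOURCE B (Python) =====
-- def crea_cod(cod):
--     d = {}
--     out = []
--     for c in cod:
--         if c not in d:
--             d[c] = len(d)
--         out.append(str(d[c]))
--     return "".join(out)
-- ===== Notes on version B (the rewrite author's own statement) =====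
-- stated objective: simpler
-- what changed: Single pass over the string that assigns each new character the rank len(d) and emits its digit string immediately into a list joined once, replacing A's two separate passes and its index-minus-duplicate-counter (i-a) rank computation.
import Mathlib
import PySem

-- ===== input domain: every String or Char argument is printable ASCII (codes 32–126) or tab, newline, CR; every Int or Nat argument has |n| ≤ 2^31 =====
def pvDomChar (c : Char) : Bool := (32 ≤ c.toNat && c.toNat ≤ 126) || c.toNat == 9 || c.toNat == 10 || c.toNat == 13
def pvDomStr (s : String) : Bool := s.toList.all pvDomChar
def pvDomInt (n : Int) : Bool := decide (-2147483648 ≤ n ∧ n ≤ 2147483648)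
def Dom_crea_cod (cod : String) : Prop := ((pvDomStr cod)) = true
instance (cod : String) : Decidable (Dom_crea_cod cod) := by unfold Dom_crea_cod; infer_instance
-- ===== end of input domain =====

-- B fuses A's two passes into one and replaces the i-a rank with len(d); return value proved equal (objective: simpler).

-- ===== PORT A =====
-- first loop: over range(0,len(cod)) with cod[i], i.e. over the enumerated characters; state (a, d)
-- second loop: d[cod[i]] never raises KeyError (every char was inserted), so getD is exact here
def crea_cod (cod : String) : String :=
  let ad := (PySem.List.enumerate cod.toList).foldl
    (fun (st : Int × PySem.Dict Char Int) ic =>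
      if st.2.contains ic.2 = false then (st.1, st.2.insert ic.2 (ic.1 - st.1))
      else (st.1 + 1, st.2)) (0, PySem.Dict.empty)
  cod.toList.foldl (fun s c => s ++ PySem.Int.toStr (ad.2.getD c 0)) ""

-- ===== PORT B =====
-- one pass: if c is new, d[c] = len(d); then append str(d[c]); finally "".join(out)
def crea_cod_alt (cod : String) : String :=
  let st := cod.toList.foldl
    (fun (st : PySem.Dict Char Int × List String) c =>
      let d := if st.1.contains c = false then st.1.insert c (st.1.size : Int) else st.1
      (d, st.2 ++ [PySem.Int.toStr (d.getD c 0)])) (PySem.Dict.empty, [])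
  PySem.Str.join "" st.2

-- ===== PRECONDITION & SPEC =====
def Spec_crea_cod (cod : String) (out : String) : Prop := out = crea_cod_alt cod
instance (cod : String) (out : String) : Decidable (Spec_crea_cod cod out) := by unfold Spec_crea_cod; infer_instance

-- ===== CLAIM (what is proved, stated in full; the proofs are below) =====
def Claim_equal_crea_cod : Prop := ∀ (cod : String), Dom_crea_cod cod → Spec_crea_cod cod (crea_cod cod)

-- ===== LEMMAS AND PROOFS =====

-- B's dict-building step, and its fold
def pvStepD (d : PySem.Dict Char Int) (c : Char) : PySem.Dict Char Int :=
  if d.contains c = false then d.insert c (d.size : Int) else d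

def pvBd (d : PySem.Dict Char Int) (l : List Char) : PySem.Dict Char Int :=
  l.foldl pvStepD d

-- A's first loop builds the SAME dict as B's, given the invariant a = i - d.size
theorem pvDictA_eq (l : List Char) : ∀ (i : Int) (d : PySem.Dict Char Int),
    ((PySem.List.enumerate l i).foldl
      (fun (st : Int × PySem.Dict Char Int) ic =>
        if st.2.contains ic.2 = false then (st.1, st.2.insert ic.2 (ic.1 - st.1))
        else (st.1 + 1, st.2)) (i - (d.size : Int), d)).2 = pvBd d l := by
  induction l with
  | nil => intro i d; simp [PySem.List.enumerate, pvBd]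
  | cons c l ih =>
    intro i d
    rw [PySem.List.enumerate_cons, List.foldl_cons]
    by_cases h : d.contains c = true
    · rw [if_neg (by simp [h])]
      have : i + 1 - (d.size : Int) = i - (d.size : Int) + 1 := by ring
      rw [← this, ih (i + 1) d]
      simp [pvBd, pvStepD, h]
    · have h' : d.contains c = false := by simpa using h
      rw [if_pos h']
      have harg : i - (i - (d.size : Int)) = (d.size : Int) := by ring
      rw [harg]
      have hsz : ((d.insert c (d.size : Int)).size : Int) = (d.size : Int) + 1 := by
        rw [PySem.Dict.size_insert]; simp [h']
      have hinv : i - (d.size : Int) = i + 1 - ((d.insert c (d.size : Int)).size : Int) := by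
        rw [hsz]; ring
      rw [hinv, ih (i + 1) (d.insert c (d.size : Int))]
      simp [pvBd, pvStepD, h']

-- lookups already present are stable under B's dict fold
theorem pvBd_mono (l : List Char) : ∀ (d : PySem.Dict Char Int) (c : Char) (v : Int),
    d.get? c = some v → (pvBd d l).get? c = some v := by
  induction l with
  | nil => intro d c v h; simpa [pvBd] using h
  | cons x l ih =>
    intro d c v h
    rw [pvBd, List.foldl_cons, ← pvBd]
    apply ih
    unfold pvStepD
    split_ifs with hx
    · rcases eq_or_ne c x with rfl | hne
      · exfalso
        have := PySem.Dict.contains_eq_isSome_get? (d := d) (k := c)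
        rw [h] at this; simp [hx] at this
      · rw [PySem.Dict.get?_insert_of_ne _ _ hne]; exact h
    · exact h

-- after pvStepD d c, c is present
theorem pvStepD_mem (d : PySem.Dict Char Int) (c : Char) :
    ∃ v, (pvStepD d c).get? c = some v := by
  unfold pvStepD
  split_ifs with h
  · exact ⟨_, PySem.Dict.get?_insert_self _ _ _⟩
  · have hc : d.contains c = true := by simpa using h
    have := PySem.Dict.contains_eq_isSome_get? (d := d) (k := c)
    rw [hc] at this
    rcases Option.isSome_iff_exists.mp this.symm with ⟨v, hv⟩
    exact ⟨v, hv⟩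

-- B's output list is the map of lookups in the FINAL dict
theorem pvBout (l : List Char) : ∀ (d : PySem.Dict Char Int) (acc : List String),
    (l.foldl
      (fun (st : PySem.Dict Char Int × List String) c =>
        let d := if st.1.contains c = false then st.1.insert c (st.1.size : Int) else st.1
        (d, st.2 ++ [PySem.Int.toStr (d.getD c 0)])) (d, acc)).2
    = acc ++ l.map (fun c => PySem.Int.toStr ((pvBd d l).getD c 0)) := by
  induction l with
  | nil => intro d acc; simp [pvBd]
  | cons c l ih =>
    intro d acc
    rw [List.foldl_cons]
    show (l.foldl _ (pvStepD d c, acc ++ [PySem.Int.toStr ((pvStepD d c).getD c 0)])).2 = _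
    rw [ih (pvStepD d c) _]
    have hBd : pvBd d (c :: l) = pvBd (pvStepD d c) l := by rfl
    rcases pvStepD_mem d c with ⟨v, hv⟩
    have hstable : (pvBd (pvStepD d c) l).get? c = some v := pvBd_mono l _ _ _ hv
    simp only [hBd, List.map_cons, List.append_assoc, List.singleton_append]
    rw [PySem.Dict.getD_eq_get?_getD, PySem.Dict.getD_eq_get?_getD, hstable, hv]

-- A's string-building fold is the join of the mapped list
theorem pvFold_join (f : Char → String) (l : List Char) : ∀ (s : String),
    l.foldl (fun s c => s ++ f c) s = s ++ PySem.Str.join "" (l.map f) := by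
  induction l with
  | nil => intro s; simp [PySem.Str.join, PySem.Chars.join, List.intercalate]
  | cons c l ih =>
    intro s
    rw [List.foldl_cons, ih (s ++ f c), List.map_cons]
    have : PySem.Str.join "" (f c :: l.map f) = f c ++ PySem.Str.join "" (l.map f) := by
      apply String.ext
      cases l.map f <;>
        simp [PySem.Str.join, PySem.Chars.join, List.intercalate]
    rw [this, String.append_assoc]

-- ===== VERDICT (by name: the statement is the Claim_ definition above) =====
theorem crea_cod_spec : Claim_equal_crea_cod := by
  intro cod _
  simp only [Spec_crea_cod, crea_cod, crea_cod_alt]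
  have hA := pvDictA_eq cod.toList 0 PySem.Dict.empty
  simp only [PySem.Dict.size_empty, Nat.cast_zero, sub_zero] at hA
  rw [hA, pvBout cod.toList PySem.Dict.empty [], pvFold_join]
  simp [pvBd]
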